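-- pv_equiv track=rewrite | github.com/mad-agentic/MoneyPrinter-short-video | src/llm_provider.py | _resolve_model_name
-- ===== SOURCE A (Python) =====
-- def _resolve_model_name(requested_model: str | None, available_models: list[str]) -> str | None:
--     """Resolve requested model against installed Ollama models.
--
--     Supports exact match, adding ':latest', and prefix-family match.
--     """
--     name = (requested_model or "").strip()
--     if not name or not available_models:
--         return None
--
--     # 1) Exact match first.
--     if name in available_models:
--         return name
--
--     # 2) Common shorthand: llama3.2 -> llama3.2:latest
--     with_latest = f"{name}:latest"
--     if with_latest in available_models:
--         return with_latest
--
--     # 3) Family/prefix match (prefer shortest => usually latest tag).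
--     prefix = f"{name}:"
--     family = sorted([m for m in available_models if m.startswith(prefix)], key=len)
--     if family:
--         return family[0]
--
--     return None
-- ===== SOURCE B (Python) =====
-- def _resolve_model_name(requested_model, available_models):
--     """Resolve requested model against installed Ollama models in ONE pass
--     (flags for exact / ':latest' match, running first-shortest family member)."""
--     name = (requested_model or "").strip()
--     if not name or not available_models:
--         return None
--     with_latest = name + ":latest"
--     prefix = name + ":"
--     has_exact = False
--     has_latest = False
--     best_family = None
--     for m in available_models:
--         if m == name:
--             has_exact = True
--         if m == with_latest:
--             has_latest = True
--         if m.startswith(prefix) and (best_family is None or len(m) < len(best_family)):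
--             best_family = m
--     if has_exact:
--         return name
--     if has_latest:
--         return with_latest
--     return best_family
-- ===== Notes on version B (the rewrite author's own statement) =====
-- stated objective: alternative
-- what changed: Replaces A's three separate membership scans plus filter-and-stable-sort with a single fold over available_models that tracks exact/':latest' flags and the first shortest prefix-family member, removing the sort entirely.
import Mathlib
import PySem

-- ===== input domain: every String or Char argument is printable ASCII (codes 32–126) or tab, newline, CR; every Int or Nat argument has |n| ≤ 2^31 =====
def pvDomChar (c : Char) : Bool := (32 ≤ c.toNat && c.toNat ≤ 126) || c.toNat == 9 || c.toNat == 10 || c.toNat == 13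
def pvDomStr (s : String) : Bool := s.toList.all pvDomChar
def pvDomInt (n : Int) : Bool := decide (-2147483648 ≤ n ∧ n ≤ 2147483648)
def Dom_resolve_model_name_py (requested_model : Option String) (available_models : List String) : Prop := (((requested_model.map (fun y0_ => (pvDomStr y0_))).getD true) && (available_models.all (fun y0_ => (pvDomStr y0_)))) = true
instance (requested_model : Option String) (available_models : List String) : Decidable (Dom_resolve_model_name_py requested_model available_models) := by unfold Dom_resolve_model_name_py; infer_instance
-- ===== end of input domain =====

-- B resolves the model in a single pass (flags + running first-shortest family member)
-- instead of A's three membership scans plus filter-and-sort; return value proved identical.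

-- ===== PORT A =====
def resolve_model_name_py (requested_model : Option String) (available_models : List String) : Option String :=
  let name := PySem.Str.strip (requested_model.getD "")
  if name = "" || available_models.isEmpty then none
  else if available_models.contains name then some name
  else
    let with_latest := name ++ ":latest"
    if available_models.contains with_latest then some with_latest
    else
      let pfx := name ++ ":"
      let family := PySem.List.sorted (available_models.filter (fun m => PySem.Str.startswith m pfx)) (fun m => PySem.Str.len m)
      -- 'if family: return family[0]' / 'return None'  =  head?
      family.head?

-- ===== PORT B =====
-- one step of Source B's loop over available_models, on the state (has_exact, has_latest, best_family)
def pvStepB (name with_latest pfx : String) (st : Bool × Bool × Option String) (m : String) :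
    Bool × Bool × Option String :=
  (st.1 || (m == name),
   st.2.1 || (m == with_latest),
   if PySem.Str.startswith m pfx &&
        (match st.2.2 with
         | none => true
         | some bf => decide (PySem.Str.len m < PySem.Str.len bf))
   then some m else st.2.2)

def resolve_model_name_py_alt (requested_model : Option String) (available_models : List String) : Option String :=
  let name := PySem.Str.strip (requested_model.getD "")
  if name = "" || available_models.isEmpty then none
  else
    let with_latest := name ++ ":latest"
    let pfx := name ++ ":"
    let st := available_models.foldl (pvStepB name with_latest pfx) (false, false, none)
    if st.1 then some name
    else if st.2.1 then some with_latest
    else st.2.2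

-- ===== PRECONDITION & SPEC =====
def Spec_resolve_model_name_py (requested_model : Option String) (available_models : List String) (out : Option String) : Prop := out = resolve_model_name_py_alt requested_model available_models
instance (requested_model : Option String) (available_models : List String) (out : Option String) : Decidable (Spec_resolve_model_name_py requested_model available_models out) := by unfold Spec_resolve_model_name_py; infer_instance

-- ===== CLAIM (what is proved, stated in full; the proofs are below) =====
def Claim_equal_resolve_model_name_py : Prop := ∀ (requested_model : Option String) (available_models : List String), Dom_resolve_model_name_py requested_model available_models → Spec_resolve_model_name_py requested_model available_models (resolve_model_name_py requested_model available_models)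

-- ===== LEMMAS AND PROOFS =====

-- the "best family so far" step, on already-filtered elements
def pvBest (st : Option String) (m : String) : Option String :=
  match st with
  | none => some m
  | some bf => if decide (PySem.Str.len m < PySem.Str.len bf) then some m else some bf

-- B's triple fold splits into three independent folds
theorem foldl_pvStepB (name wl pfx : String) (xs : List String) (e l : Bool) (b : Option String) :
    xs.foldl (pvStepB name wl pfx) (e, l, b) =
      (xs.foldl (fun a m => a || (m == name)) e,
       xs.foldl (fun a m => a || (m == wl)) l,
       xs.foldl (fun a m => if PySem.Str.startswith m pfx = true then pvBest a m else a) b) := by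
  induction xs generalizing e l b with
  | nil => rfl
  | cons x t ih =>
    have hb : (pvStepB name wl pfx (e, l, b) x).2.2 =
        (if PySem.Str.startswith x pfx = true then pvBest b x else b) := by
      simp only [pvStepB, pvBest]
      cases b with
      | none => by_cases h : PySem.Str.startswith x pfx = true <;> simp [h]
      | some bf =>
        simp only [Bool.and_eq_true, decide_eq_true_eq]
        split_ifs <;> first | rfl | tauto
    simp only [List.foldl_cons, ih, hb]
    rfl

theorem foldl_or_contains (name : String) (xs : List String) (e : Bool) :
    xs.foldl (fun a m => a || (m == name)) e = (e || xs.contains name) := by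
  induction xs generalizing e with
  | nil => simp
  | cons x t ih =>
    have h1 : (x == name) = (name == x) := by
      by_cases h : x = name
      · simp [h]
      · simp [h, Ne.symm h]
    simp only [List.foldl_cons, ih, List.contains_cons, h1, Bool.or_assoc]

-- head of an insertion-sort fold = running "first strictly smaller" minimum
theorem head_foldl_insertBy (key : String → Int) (xs : List String) (acc : List String) :
    (xs.foldl (fun a x => PySem.List.insertBy (fun a b => decide (key a < key b)) x a) acc).head? =
      xs.foldl (fun b m =>
        match b with
        | none => some m
        | some bf => if decide (key m < key bf) then some m else some bf) acc.head? := by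
  induction xs generalizing acc with
  | nil => rfl
  | cons x t ih =>
    simp only [List.foldl_cons, ih]
    congr 1
    cases acc with
    | nil => rfl
    | cons y ys =>
      simp only [PySem.List.insertBy, List.head?_cons]
      by_cases h : key x < key y <;> simp [h]

theorem head_sorted_eq (pfx : String) (xs : List String) :
    (PySem.List.sorted (xs.filter (fun m => PySem.Str.startswith m pfx)) (fun m => PySem.Str.len m)).head? =
      xs.foldl (fun a m => if PySem.Str.startswith m pfx = true then pvBest a m else a) none := by
  rw [PySem.List.sorted_eq_foldl_insertBy,
      head_foldl_insertBy (fun m => PySem.Str.len m), List.foldl_filter]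
  simp only [List.head?_nil]
  have hf : (fun (b : Option String) (m : String) =>
      if PySem.Str.startswith m pfx = true then
        (match b with
         | none => some m
         | some bf => if decide (PySem.Str.len m < PySem.Str.len bf) then some m else some bf)
      else b) =
      (fun a m => if PySem.Str.startswith m pfx = true then pvBest a m else a) := by
    funext b m
    cases b <;> rfl
  rw [hf]

-- ===== VERDICT (by name: the statement is the Claim_ definition above) =====
theorem resolve_model_name_py_spec : Claim_equal_resolve_model_name_py := by
  intro rm avail _
  unfold Spec_resolve_model_name_py resolve_model_name_py resolve_model_name_py_alt
  simp only [foldl_pvStepB, foldl_or_contains, Bool.false_or, head_sorted_eq]
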